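-- pv_equiv track=rewrite | github.com/stormhair/csci544 | hw2/postagging/postrain.py | str2example
-- ===== SOURCE A (Python) =====
-- def str2example(strline):
-- 	ret = ''
-- 	tokens = strline.split(' ')
-- 	tokens.append('EOS/EOS')
-- 	tokens.insert(0, 'BOS/BOS')
-- 	words = []
-- 	tags = []
-- 	for token in tokens:
-- 		token = token.split('/')
-- 		e = len(token)
-- 		if e == 2:
-- 			words.append(token[0])
-- 		else:
-- 			words.append('/'.join(token[0:e-1]))
-- 		tags.append(token[e-1])
-- 	for i in range(1, len(words)-1):
-- 		ret+=(tags[i]+' w:'+words[i]+' w_prev:'+words[i-1]+' w_next:'+words[i+1]+'\n')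
-- 	return ret
-- ===== SOURCE B (Python) =====
-- def str2example(strline):
--     # Streaming one-pass: carry the previous word and the pending (word, tag);
--     # emit each line as soon as the next word is known, flush the last with EOS.
--     out = []
--     prev_w = 'BOS'
--     cur = None
--     for tok in strline.split(' '):
--         w, _, tag = tok.rpartition('/')
--         if cur is not None:
--             cw, ctag = cur
--             out.append(ctag + ' w:' + cw + ' w_prev:' + prev_w + ' w_next:' + w + '\n')
--             prev_w = cw
--         cur = (w, tag)
--     cw, ctag = cur
--     out.append(ctag + ' w:' + cw + ' w_prev:' + prev_w + ' w_next:EOS\n')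
--     return ''.join(out)
-- ===== Notes on version B (the rewrite author's own statement) =====
-- stated objective: alternative
-- what changed: B replaces A's staged passes (pad the token list with BOS/EOS sentinels, build parallel words/tags lists, then an index-based range loop over the middle) with a single streaming pass that carries the previous word and a pending (word, tag) pair, emitting each line once the next word is known and flushing the last line with EOS; tokens are parsed at their last '/' instead of a full split with an if/else.
import Mathlib
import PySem

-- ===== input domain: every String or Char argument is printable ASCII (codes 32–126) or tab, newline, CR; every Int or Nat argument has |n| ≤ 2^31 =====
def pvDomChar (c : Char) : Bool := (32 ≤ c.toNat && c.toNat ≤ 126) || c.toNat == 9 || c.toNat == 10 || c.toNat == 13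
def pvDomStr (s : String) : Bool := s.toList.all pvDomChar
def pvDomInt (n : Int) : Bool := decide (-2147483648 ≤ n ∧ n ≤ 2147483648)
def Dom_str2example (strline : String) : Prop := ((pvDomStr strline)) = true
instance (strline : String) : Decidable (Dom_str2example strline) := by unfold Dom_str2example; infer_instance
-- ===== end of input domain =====

-- B replaces A's staged passes (pad with sentinels, build parallel words/tags lists, index loop over the
-- middle) by a single streaming pass carrying the previous word and a pending (word, tag) pair (same cost).

-- ===== PORT A =====
-- A, transliterated over List Char (PySem.Chars primitives); strings enter/leave via toList/ofList.
def str2example (strline : String) : String :=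
  let tokens := PySem.Chars.splitOn strline.toList [' ']
  let tokens := tokens ++ ["EOS/EOS".toList]
  let tokens := "BOS/BOS".toList :: tokens
  let wt := tokens.foldl
    (fun (acc : List (List Char) × List (List Char)) token =>
      let tk := PySem.Chars.splitOn token ['/']
      let e := tk.length
      let w := if e = 2 then PySem.List.pyGetD tk 0 []
               else PySem.Chars.join ['/'] (PySem.List.slice tk (some 0) (some ((e : Int) - 1)))
      (acc.1 ++ [w], acc.2 ++ [PySem.List.pyGetD tk ((e : Int) - 1) []]))
    ([], [])
  let ret := (PySem.List.pyRange 1 ((wt.1.length : Int) - 1) 1).foldl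
    (fun ret i =>
      ret ++ PySem.List.pyGetD wt.2 i [] ++ " w:".toList ++ PySem.List.pyGetD wt.1 i []
          ++ " w_prev:".toList ++ PySem.List.pyGetD wt.1 (i - 1) []
          ++ " w_next:".toList ++ PySem.List.pyGetD wt.1 (i + 1) [] ++ ['\n']) []
  String.ofList ret

-- ===== PORT B =====
-- hand port of str.rpartition('/') (PySem has no rpartition): scan from the right for the last '/';
-- exact for a single-character separator.  In Source B only components 0 and 2 are used.
def rpartitionSlash (t : List Char) : List Char × List Char × List Char :=
  let r := t.reverse
  let after := r.takeWhile (fun c => c ≠ '/')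
  let rest := r.dropWhile (fun c => c ≠ '/')
  if rest.isEmpty then ([], [], t)
  else (rest.tail.reverse, ['/'], after.reverse)

-- Source B: fold with state (prev_w, cur, out); cur = none models Python's `cur = None` before the first token.
def str2example_alt (strline : String) : String :=
  let st := (PySem.Chars.splitOn strline.toList [' ']).foldl
    (fun (st : List Char × Option (List Char × List Char) × List (List Char)) tok =>
      let w := (rpartitionSlash tok).1
      let tag := (rpartitionSlash tok).2.2
      match st.2.1 with
      | some (cw, ctag) =>
          (cw, some (w, tag),
           st.2.2 ++ [ctag ++ " w:".toList ++ cw ++ " w_prev:".toList ++ st.1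
                       ++ " w_next:".toList ++ w ++ ['\n']])
      | none => (st.1, some (w, tag), st.2.2))
    ("BOS".toList, none, [])
  match st.2.1 with
  | some (cw, ctag) =>
      String.ofList (PySem.Chars.join []
        (st.2.2 ++ [ctag ++ " w:".toList ++ cw ++ " w_prev:".toList ++ st.1
                     ++ " w_next:EOS\n".toList]))
  | none => ""   -- unreachable: str.split(' ') always yields at least one token

-- ===== PRECONDITION & SPEC =====
def Spec_str2example (strline : String) (out : String) : Prop := out = str2example_alt strline
instance (strline : String) (out : String) : Decidable (Spec_str2example strline out) := by unfold Spec_str2example; infer_instance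

-- ===== CLAIM (what is proved, stated in full; the proofs are below) =====
def Claim_equal_str2example : Prop := ∀ (strline : String), Dom_str2example strline → Spec_str2example strline (str2example strline)

-- ===== LEMMAS AND PROOFS =====

-- structural model of splitOn with a single-character separator
def spC (d : Char) : List Char → List (List Char)
  | [] => [[]]
  | c :: rest => if c = d then [] :: spC d rest else List.modifyHead (fun h => c :: h) (spC d rest)

theorem spC_ne_nil (d : Char) (cs : List Char) : spC d cs ≠ [] := by
  induction cs with
  | nil => simp [spC]
  | cons c rest ih =>
    simp only [spC]
    split
    · simp
    · cases h : spC d rest with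
      | nil => exact absurd h ih
      | cons a l => simp [List.modifyHead]

theorem splitOn_go_eq (d : Char) : ∀ (fuel : Nat) (l cur : List Char) (acc : List (List Char)),
    l.length < fuel →
      PySem.Chars.splitOn.go [d] fuel l cur acc
        = acc.reverse ++ List.modifyHead (fun h => cur.reverse ++ h) (spC d l) := by
  intro fuel
  induction fuel with
  | zero => intro l cur acc h; omega
  | succ n ih =>
    intro l cur acc h
    cases l with
    | nil =>
      cases n <;> simp [PySem.Chars.splitOn.go, spC, List.modifyHead]
    | cons c rest =>
      rw [show PySem.Chars.splitOn.go [d] (n+1) (c :: rest) cur acc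
            = (if [d].isPrefixOf (c :: rest)
                 then PySem.Chars.splitOn.go [d] n (List.drop [d].length (c :: rest)) [] (cur.reverse :: acc)
                 else PySem.Chars.splitOn.go [d] n rest (c :: cur) acc) from rfl]
      simp only [List.length_cons] at h
      by_cases hc : c = d
      · subst hc
        simp only [List.isPrefixOf, BEq.rfl, Bool.and_self, if_true,
          List.length_singleton, List.drop_one, List.tail_cons]
        rw [ih rest [] (cur.reverse :: acc) (by omega)]
        obtain ⟨p, ps, hp⟩ : ∃ p ps, spC c rest = p :: ps := by
          cases hsp : spC c rest with
          | nil => exact absurd hsp (spC_ne_nil c rest)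
          | cons p ps => exact ⟨p, ps, rfl⟩
        simp [spC, hp, List.modifyHead]
      · have : [d].isPrefixOf (c :: rest) = false := by
          simp [List.isPrefixOf]; exact fun hdc => absurd hdc.symm hc
        rw [this]
        simp only [Bool.false_eq_true, if_false]
        rw [ih rest (c :: cur) acc (by omega)]
        obtain ⟨p, ps, hp⟩ : ∃ p ps, spC d rest = p :: ps := by
          cases hsp : spC d rest with
          | nil => exact absurd hsp (spC_ne_nil d rest)
          | cons p ps => exact ⟨p, ps, rfl⟩
        simp [spC, hc, hp, List.modifyHead]

theorem splitOn_eq_spC (cs : List Char) (d : Char) :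
    PySem.Chars.splitOn cs [d] = spC d cs := by
  rw [show PySem.Chars.splitOn cs [d] = PySem.Chars.splitOn.go [d] (cs.length + 1) cs [] [] from rfl]
  rw [splitOn_go_eq d (cs.length + 1) cs [] [] (by omega)]
  obtain ⟨p, ps, hp⟩ : ∃ p ps, spC d cs = p :: ps := by
    cases hsp : spC d cs with
    | nil => exact absurd hsp (spC_ne_nil d cs)
    | cons p ps => exact ⟨p, ps, rfl⟩
  simp [hp, List.modifyHead]


def lastD (l : List (List Char)) : List Char := l.getLast?.getD []

theorem spC_append (d c : Char) (ys : List Char) :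
    spC d (ys ++ [c]) = if c = d then spC d ys ++ [[]]
      else (spC d ys).dropLast ++ [lastD (spC d ys) ++ [c]] := by
  induction ys with
  | nil =>
    by_cases hc : c = d <;> simp [spC, hc, lastD, List.modifyHead]
  | cons y ys ih =>
    obtain ⟨p, ps, hp⟩ : ∃ p ps, spC d ys = p :: ps := by
      cases hsp : spC d ys with
      | nil => exact absurd hsp (spC_ne_nil d ys)
      | cons p ps => exact ⟨p, ps, rfl⟩
    rw [List.cons_append]
    simp only [spC]
    rw [ih]
    by_cases hy : y = d <;> by_cases hc : c = d <;>
      simp only [hy, hc, if_true, if_false, hp] <;>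
      cases ps with
      | nil => simp [lastD, List.modifyHead]
      | cons q qs => simp [lastD, List.modifyHead, List.dropLast_cons_of_ne_nil]

theorem join_spC (d : Char) (ys : List Char) :
    PySem.Chars.join [d] (spC d ys) = ys := by
  induction ys with
  | nil => simp [spC, PySem.Chars.join_singleton]
  | cons y ys ih =>
    obtain ⟨p, ps, hp⟩ : ∃ p ps, spC d ys = p :: ps := by
      cases hsp : spC d ys with
      | nil => exact absurd hsp (spC_ne_nil d ys)
      | cons p ps => exact ⟨p, ps, rfl⟩
    by_cases hy : y = d
    · rw [hy]
      simp only [spC, if_true, hp]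
      rw [show ([] : List Char) :: p :: ps = [] :: p :: ps from rfl, PySem.Chars.join_cons_cons]
      simp only [List.nil_append, ← hp, ih, List.singleton_append]
    · simp only [spC, hy, if_false, hp, List.modifyHead]
      cases ps with
      | nil =>
        rw [PySem.Chars.join_singleton]
        have := ih; rw [hp, PySem.Chars.join_singleton] at this
        simp [this]
      | cons q qs =>
        rw [PySem.Chars.join_cons_cons]
        have := ih; rw [hp, PySem.Chars.join_cons_cons] at this
        simp only [List.cons_append, this]

theorem rp_append_ne (ys : List Char) (c : Char) (hc : ¬ c = '/') :
    (rpartitionSlash (ys ++ [c])).1 = (rpartitionSlash ys).1 ∧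
    (rpartitionSlash (ys ++ [c])).2.2 = (rpartitionSlash ys).2.2 ++ [c] := by
  simp only [rpartitionSlash, List.reverse_append, List.reverse_cons, List.reverse_nil,
    List.nil_append, List.singleton_append, List.takeWhile_cons, List.dropWhile_cons,
    hc, ne_eq, decide_not]
  cases h : ys.reverse.dropWhile (fun x => !decide (x = '/')) with
  | nil => simp
  | cons a l => simp

theorem tokenM (t : List Char) :
    PySem.Chars.join ['/'] (spC '/' t).dropLast = (rpartitionSlash t).1 ∧
    lastD (spC '/' t) = (rpartitionSlash t).2.2 := by
  induction t using List.reverseRecOn with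
  | nil => simp [spC, rpartitionSlash, lastD, PySem.Chars.join_nil]
  | append_singleton ys c ih =>
    by_cases hc : c = '/'
    · subst hc
      rw [spC_append]
      simp only [if_true]
      constructor
      · rw [List.dropLast_concat, join_spC]
        simp [rpartitionSlash, List.reverse_append]
      · simp [rpartitionSlash, List.reverse_append, lastD]
    · rw [spC_append]
      simp only [hc, if_false]
      obtain ⟨h1, h2⟩ := rp_append_ne ys c hc
      constructor
      · rw [h1, ← ih.1, List.dropLast_concat]
      · rw [h2, ← ih.2, lastD]
        simp [lastD]


theorem join_nil_flatten (parts : List (List Char)) :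
    PySem.Chars.join [] parts = parts.flatten := by
  induction parts with
  | nil => simp [PySem.Chars.join_nil]
  | cons p ps ih =>
    cases ps with
    | nil => simp [PySem.Chars.join_singleton]
    | cons q qs => rw [PySem.Chars.join_cons_cons]; simp_all

theorem fw_eq (t : List Char) :
    (if (PySem.Chars.splitOn t ['/']).length = 2
       then PySem.List.pyGetD (PySem.Chars.splitOn t ['/']) 0 []
       else PySem.Chars.join ['/'] (PySem.List.slice (PySem.Chars.splitOn t ['/'])
              (some 0) (some (((PySem.Chars.splitOn t ['/']).length : Int) - 1))))
    = (rpartitionSlash t).1 := by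
  rw [splitOn_eq_spC, ← (tokenM t).1]
  by_cases h2 : (spC '/' t).length = 2
  · obtain ⟨a, b, hab⟩ := List.length_eq_two.mp h2
    rw [if_pos h2, hab]
    simp [PySem.List.pyGetD_zero_cons, PySem.Chars.join_singleton]
  · rw [if_neg h2]
    congr 1
    have hlen : 1 ≤ (spC '/' t).length := by
      cases hsp : spC '/' t with
      | nil => exact absurd hsp (spC_ne_nil '/' t)
      | cons p ps => simp
    have hcast : ((spC '/' t).length : Int) - 1 = (((spC '/' t).length - 1 : Nat) : Int) := by
      omega
    rw [hcast, show (some (0 : Int)) = some ((0 : Nat) : Int) from rfl,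
        show (((((spC '/' t).length - 1 : Nat)) : Int)) = ((0 : Nat) : Int) + (((spC '/' t).length - 1 : Nat) : Int) from by omega,
        PySem.List.slice_natCast_add, List.drop_zero, ← List.dropLast_eq_take]

theorem ft_eq (t : List Char) :
    PySem.List.pyGetD (PySem.Chars.splitOn t ['/'])
        (((PySem.Chars.splitOn t ['/']).length : Int) - 1) []
      = (rpartitionSlash t).2.2 := by
  rw [splitOn_eq_spC, ← (tokenM t).2]
  obtain ⟨p, ps, hp⟩ : ∃ p ps, spC '/' t = p :: ps := by
    cases hsp : spC '/' t with
    | nil => exact absurd hsp (spC_ne_nil '/' t)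
    | cons p ps => exact ⟨p, ps, rfl⟩
  rw [hp]
  rw [show (((p :: ps).length : Int) - 1) = ((ps.length : Nat) : Int) from by simp,
      PySem.List.pyGetD_natCast]
  simp [lastD, List.getD, List.getLast?_eq_getElem?]

theorem foldA (fw ft : List Char → List Char) (ts : List (List Char)) :
    ∀ (ws tgs : List (List Char)),
    ts.foldl (fun acc token => (acc.1 ++ [fw token], acc.2 ++ [ft token])) (ws, tgs)
      = (ws ++ ts.map fw, tgs ++ ts.map ft) := by
  induction ts with
  | nil => intro ws tgs; simp
  | cons t ts ih => intro ws tgs; simp [ih]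

theorem mapRange_zipWith3 {β γ : Type} (f : β → β → β → γ) (d : β) :
    ∀ (ps : List β),
      (List.range (ps.length - 2)).map
          (fun k => f (ps.getD k d) (ps.getD (k + 1) d) (ps.getD (k + 2) d))
        = List.zipWith3 f ps (ps.drop 1) (ps.drop 2)
  | [] => by simp
  | [a] => by simp
  | [a, b] => by simp [List.zipWith3]
  | a :: b :: c :: rest => by
    have ih := mapRange_zipWith3 f d (b :: c :: rest)
    simp only [show (b :: c :: rest).drop 1 = c :: rest from rfl,
      show (b :: c :: rest).drop 2 = rest from rfl, List.getD_cons_succ] at ih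
    rw [show (a :: b :: c :: rest).length - 2 = ((b :: c :: rest).length - 2) + 1 from by
          simp,
        List.range_succ_eq_map]
    simp only [List.map_cons, List.map_map, Function.comp_def, Nat.succ_eq_add_one,
      List.getD_cons_zero, List.getD_cons_succ]
    rw [show (a :: b :: c :: rest).drop 1 = b :: c :: rest from rfl,
        show (a :: b :: c :: rest).drop 2 = c :: rest from rfl,
        show List.zipWith3 f (a :: b :: c :: rest) (b :: c :: rest) (c :: rest)
            = f a b c :: List.zipWith3 f (b :: c :: rest) (c :: rest) rest from rfl,
        ← ih]


theorem getD_map' {α β : Type} (f : α → β) (l : List α) (j : Nat) (hj : j < l.length)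
    (d : β) (d' : α) : (l.map f).getD j d = f (l.getD j d') := by
  rw [List.getD_eq_getElem?_getD, List.getD_eq_getElem?_getD, List.getElem?_map,
      List.getElem?_eq_getElem hj]
  simp

theorem lineLoop (pairs : List (List Char × List Char)) :
    (PySem.List.pyRange 1 (((pairs.map Prod.fst).length : Int) - 1) 1).foldl
      (fun ret i =>
        ret ++ PySem.List.pyGetD (pairs.map Prod.snd) i [] ++ " w:".toList
            ++ PySem.List.pyGetD (pairs.map Prod.fst) i []
            ++ " w_prev:".toList ++ PySem.List.pyGetD (pairs.map Prod.fst) (i - 1) []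
            ++ " w_next:".toList ++ PySem.List.pyGetD (pairs.map Prod.fst) (i + 1) [] ++ ['\n']) []
    = PySem.Chars.join []
        (List.zipWith3
          (fun pw cu nx => cu.2 ++ " w:".toList ++ cu.1 ++ " w_prev:".toList ++ pw.1
              ++ " w_next:".toList ++ nx.1 ++ ['\n'])
          pairs (pairs.drop 1) (pairs.drop 2)) := by
  rw [join_nil_flatten, ← mapRange_zipWith3 _ (([], []) : List Char × List Char)]
  simp only [List.append_assoc]
  rw [PySem.List.foldl_append_eq_flatMap
        (g := fun i =>
          PySem.List.pyGetD (pairs.map Prod.snd) i [] ++ (" w:".toList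
            ++ (PySem.List.pyGetD (pairs.map Prod.fst) i []
            ++ (" w_prev:".toList ++ (PySem.List.pyGetD (pairs.map Prod.fst) (i - 1) []
            ++ (" w_next:".toList ++ (PySem.List.pyGetD (pairs.map Prod.fst) (i + 1) [] ++ ['\n'])))))))]
  rw [List.nil_append, List.flatMap_def, PySem.List.pyRange_one, List.map_map]
  rw [show ((((pairs.map Prod.fst).length : Int) - 1) - 1).toNat = pairs.length - 2 from by
        simp only [List.length_map]; omega]
  congr 1
  apply List.map_congr_left
  intro k hk
  rw [List.mem_range] at hk
  have hn : k + 2 < pairs.length := by omega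
  have e1 : (1 : Int) + (k : Int) = ((k + 1 : Nat) : Int) := by push_cast; ring
  have e2 : ((k + 1 : Nat) : Int) - 1 = ((k : Nat) : Int) := by push_cast; ring
  have e3 : ((k + 1 : Nat) : Int) + 1 = ((k + 2 : Nat) : Int) := by push_cast; ring
  simp only [Function.comp_def, e1, e2, e3, PySem.List.pyGetD_natCast]
  rw [getD_map' Prod.snd pairs (k + 1) (by omega) [] ([], []),
      getD_map' Prod.fst pairs (k + 1) (by omega) [] ([], []),
      getD_map' Prod.fst pairs k (by omega) [] ([], []),
      getD_map' Prod.fst pairs (k + 2) (by omega) [] ([], [])]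


def pairF (t : List Char) : List Char × List Char :=
  ((rpartitionSlash t).1, (rpartitionSlash t).2.2)

theorem mapFw (ts : List (List Char)) :
    ts.map (fun token =>
      if (PySem.Chars.splitOn token ['/']).length = 2
      then PySem.List.pyGetD (PySem.Chars.splitOn token ['/']) 0 []
      else PySem.Chars.join ['/'] (PySem.List.slice (PySem.Chars.splitOn token ['/'])
             (some 0) (some (((PySem.Chars.splitOn token ['/']).length : Int) - 1))))
      = (ts.map pairF).map Prod.fst := by
  rw [List.map_map]
  exact List.map_congr_left (fun t _ => fw_eq t)

theorem mapFt (ts : List (List Char)) :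
    ts.map (fun token =>
      PySem.List.pyGetD (PySem.Chars.splitOn token ['/'])
        (((PySem.Chars.splitOn token ['/']).length : Int) - 1) [])
      = (ts.map pairF).map Prod.snd := by
  rw [List.map_map]
  exact List.map_congr_left (fun t _ => ft_eq t)

-- the windowed middle form both programs are reduced to (proof-internal only)
def midForm (strline : String) : String :=
  let tokens := "BOS/BOS".toList :: PySem.Chars.splitOn strline.toList [' '] ++ ["EOS/EOS".toList]
  let pairs := tokens.map pairF
  let lines := List.zipWith3
    (fun pw cu nx =>
      cu.2 ++ " w:".toList ++ cu.1 ++ " w_prev:".toList ++ pw.1 ++ " w_next:".toList ++ nx.1 ++ ['\n'])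
    pairs (pairs.drop 1) (pairs.drop 2)
  String.ofList (PySem.Chars.join [] lines)

theorem A_eq_mid : ∀ s, str2example s = midForm s := by
  intro s
  unfold str2example midForm
  simp only []
  rw [foldA]
  simp only [List.nil_append]
  rw [mapFw, mapFt, lineLoop]
  rfl

-- ===== B-side lemmas =====
def lineL (pw : List Char) (cu : List Char × List Char) (nw : List Char) : List Char :=
  cu.2 ++ " w:".toList ++ cu.1 ++ " w_prev:".toList ++ pw ++ " w_next:".toList ++ nw ++ ['\n']

def Lrec (pw : List Char) (cur : List Char × List Char) : List (List Char) → List (List Char)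
  | [] => [lineL pw cur "EOS".toList]
  | t :: rest => lineL pw cur (pairF t).1 :: Lrec cur.1 (pairF t) rest

def stepB (st : List Char × Option (List Char × List Char) × List (List Char)) (tok : List Char) :
    List Char × Option (List Char × List Char) × List (List Char) :=
  let w := (rpartitionSlash tok).1
  let tag := (rpartitionSlash tok).2.2
  match st.2.1 with
  | some (cw, ctag) =>
      (cw, some (w, tag),
       st.2.2 ++ [ctag ++ " w:".toList ++ cw ++ " w_prev:".toList ++ st.1
                   ++ " w_next:".toList ++ w ++ ['\n']])
  | none => (st.1, some (w, tag), st.2.2)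

def flushL : List Char × Option (List Char × List Char) × List (List Char) → List (List Char)
  | (pw, some cu, ls) => ls ++ [lineL pw cu "EOS".toList]
  | (_, none, ls) => ls

theorem foldB_some (ts : List (List Char)) :
    ∀ (pw : List Char) (cu : List Char × List Char) (acc : List (List Char)),
      ∃ fpw fcu fls, ts.foldl stepB (pw, some cu, acc) = (fpw, some fcu, fls) := by
  induction ts with
  | nil => intro pw cu acc; exact ⟨_, _, _, rfl⟩
  | cons t ts ih =>
    intro pw cu acc
    obtain ⟨cw, ct⟩ := cu
    rw [List.foldl_cons,
        show stepB (pw, some (cw, ct), acc) t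
          = (cw, some (pairF t), acc ++ [lineL pw (cw, ct) (pairF t).1]) from rfl]
    exact ih _ _ _

theorem foldB_L (ts : List (List Char)) :
    ∀ (pw : List Char) (cu : List Char × List Char) (acc : List (List Char)),
      flushL (ts.foldl stepB (pw, some cu, acc)) = acc ++ Lrec pw cu ts := by
  induction ts with
  | nil => intro pw cu acc; simp [flushL, Lrec]
  | cons t ts ih =>
    intro pw cu acc
    obtain ⟨cw, ct⟩ := cu
    rw [List.foldl_cons,
        show stepB (pw, some (cw, ct), acc) t
          = (cw, some (pairF t), acc ++ [lineL pw (cw, ct) (pairF t).1]) from rfl,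
        ih, Lrec]
    simp

theorem zip_Lrec (pE : List Char × List Char) (hE : pE.1 = "EOS".toList) :
    ∀ (ts : List (List Char)) (p0 cu : List Char × List Char),
      List.zipWith3
        (fun pw cu nx => cu.2 ++ " w:".toList ++ cu.1 ++ " w_prev:".toList ++ pw.1
            ++ " w_next:".toList ++ nx.1 ++ ['\n'])
        (p0 :: cu :: ts.map pairF ++ [pE]) (cu :: ts.map pairF ++ [pE]) (ts.map pairF ++ [pE])
      = Lrec p0.1 cu ts := by
  intro ts
  induction ts with
  | nil => intro p0 cu; simp [List.zipWith3, Lrec, lineL, hE]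
  | cons t ts ih =>
    intro p0 cu
    simp only [List.map_cons, List.cons_append]
    rw [show List.zipWith3
          (fun pw cu nx => cu.2 ++ " w:".toList ++ cu.1 ++ " w_prev:".toList ++ pw.1
              ++ " w_next:".toList ++ nx.1 ++ ['\n'])
          (p0 :: cu :: pairF t :: (ts.map pairF ++ [pE]))
          (cu :: pairF t :: (ts.map pairF ++ [pE])) (pairF t :: (ts.map pairF ++ [pE]))
        = (cu.2 ++ " w:".toList ++ cu.1 ++ " w_prev:".toList ++ p0.1
            ++ " w_next:".toList ++ (pairF t).1 ++ ['\n'])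
          :: List.zipWith3
              (fun pw cu nx => cu.2 ++ " w:".toList ++ cu.1 ++ " w_prev:".toList ++ pw.1
                  ++ " w_next:".toList ++ nx.1 ++ ['\n'])
              (cu :: pairF t :: (ts.map pairF ++ [pE]))
              (pairF t :: (ts.map pairF ++ [pE])) (ts.map pairF ++ [pE]) from rfl]
    rw [Lrec]
    have := ih cu (pairF t)
    simp only [List.cons_append] at this
    rw [this]
    rfl

theorem B_eq_mid : ∀ s, str2example_alt s = midForm s := by
  intro s
  unfold str2example_alt midForm
  simp only []
  obtain ⟨t0, rest, htoks⟩ : ∃ t0 rest, PySem.Chars.splitOn s.toList [' '] = t0 :: rest := by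
    rw [splitOn_eq_spC]
    cases h : spC ' ' s.toList with
    | nil => exact absurd h (spC_ne_nil ' ' s.toList)
    | cons p ps => exact ⟨p, ps, rfl⟩
  rw [htoks]
  rw [show ((t0 :: rest).foldl
        (fun (st : List Char × Option (List Char × List Char) × List (List Char)) tok =>
          let w := (rpartitionSlash tok).1
          let tag := (rpartitionSlash tok).2.2
          match st.2.1 with
          | some (cw, ctag) =>
              (cw, some (w, tag),
               st.2.2 ++ [ctag ++ " w:".toList ++ cw ++ " w_prev:".toList ++ st.1
                           ++ " w_next:".toList ++ w ++ ['\n']])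
          | none => (st.1, some (w, tag), st.2.2))
        ("BOS".toList, none, []))
      = rest.foldl stepB ("BOS".toList, some (pairF t0), []) from rfl]
  have hfold := foldB_L rest "BOS".toList (pairF t0) []
  rw [List.nil_append] at hfold
  -- the final match of the port is join [] (flushL final-state)
  obtain ⟨fpw, fcu, fls, hfin⟩ := foldB_some rest "BOS".toList (pairF t0) []
  rw [hfin] at hfold ⊢
  obtain ⟨fc1, fc2⟩ := fcu
  rw [show (match (fpw, some (fc1, fc2), fls).2.1 with
      | some (cw, ctag) =>
          String.ofList (PySem.Chars.join []
            ((fpw, some (fc1, fc2), fls).2.2 ++ [ctag ++ " w:".toList ++ cw ++ " w_prev:".toList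
              ++ (fpw, some (fc1, fc2), fls).1 ++ " w_next:EOS\n".toList]))
      | none => "")
    = String.ofList (PySem.Chars.join [] (flushL (fpw, some (fc1, fc2), fls))) from by
      simp only [flushL, lineL]
      rw [show (" w_next:EOS\n".toList : List Char) = " w_next:".toList ++ ("EOS".toList ++ ['\n']) from by decide]
      simp]
  rw [hfold]
  -- rewrite the mid pairs list and apply zip_Lrec
  have hBOS : pairF "BOS/BOS".toList = ("BOS".toList, "BOS".toList) := by decide
  have hEOS : pairF "EOS/EOS".toList = ("EOS".toList, "EOS".toList) := by decide
  rw [show ("BOS/BOS".toList :: (t0 :: rest) ++ ["EOS/EOS".toList]).map pairF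
        = pairF "BOS/BOS".toList :: pairF t0 :: rest.map pairF ++ [pairF "EOS/EOS".toList] from by
        simp]
  rw [hBOS, hEOS]
  have hz := zip_Lrec ("EOS".toList, "EOS".toList) rfl rest ("BOS".toList, "BOS".toList) (pairF t0)
  simp only [List.cons_append] at hz ⊢
  rw [show (("BOS".toList, "BOS".toList) :: pairF t0 :: (rest.map pairF ++ [("EOS".toList, "EOS".toList)])).drop 1
        = pairF t0 :: (rest.map pairF ++ [("EOS".toList, "EOS".toList)]) from rfl,
      show (("BOS".toList, "BOS".toList) :: pairF t0 :: (rest.map pairF ++ [("EOS".toList, "EOS".toList)])).drop 2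
        = rest.map pairF ++ [("EOS".toList, "EOS".toList)] from rfl,
      hz]

-- ===== VERDICT (by name: the statement is the Claim_ definition above) =====
theorem str2example_spec : Claim_equal_str2example := by
  intro s _
  unfold Spec_str2example
  rw [A_eq_mid, B_eq_mid]
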